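-- pv_equiv track=rewrite | github.com/berhanu-tarekegn/onboarding-and-verification-services | app/core/authz.py | _permission_closure
-- ===== SOURCE A (Python) =====
-- def _permission_closure(start: set[str]) -> set[str]:
--     """Compute effective permissions via implication edges (DFS).
--
--     This is used to prevent accidental privilege escalation where a granted
--     action implicitly enables another action.
--     """
--     # Minimal implication graph (extend as needed).
--     implies: dict[str, set[str]] = {
--         # Submissions
--         "submissions.read_all": {"submissions.read"},
--         "submissions.transition": {"submissions.read_all"},
--         "submissions.update": {"submissions.read"},
--         "submissions.delete": {"submissions.read"},
--         "submissions.submit": {"submissions.read"},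
--         "submissions.comment": {"submissions.read"},
--         # Products
--         "products.create": {"products.read"},
--         "products.update": {"products.read"},
--         "products.delete": {"products.read"},
--         "products.activate": {"products.read"},
--         "products.deactivate": {"products.read"},
--         # Templates
--         "templates.create": {"templates.read"},
--         "templates.update": {"templates.read"},
--         "templates.publish": {"templates.read"},
--         # Baseline templates
--         "baseline_templates.create": {"baseline_templates.read"},
--         "baseline_templates.update": {"baseline_templates.read"},
--         "baseline_templates.delete": {"baseline_templates.read"},
--         "baseline_templates.definitions.create": {"baseline_templates.read"},
--         "baseline_templates.definitions.update": {"baseline_templates.read"},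
--         "baseline_templates.definitions.delete": {"baseline_templates.read"},
--     }
--
--     visited: set[str] = set()
--     stack: list[str] = list(start)
--     while stack:
--         p = stack.pop()
--         if p in visited:
--             continue
--         visited.add(p)
--         for nxt in implies.get(p, set()):
--             if nxt not in visited:
--                 stack.append(nxt)
--     return visited
-- ===== SOURCE B (Python) =====
-- def _permission_closure(start: set[str]) -> set[str]:
--     """Compute effective permissions by unioning precomputed per-permission closures.
--
--     The implication graph is fixed and tiny, so instead of running a DFS at
--     every call we flatten it once into a table mapping each permission to the
--     full set of permissions it transitively implies, and take a single pass
--     over ``start``.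
--     """
--     # Each key's TRANSITIVE implications (the key itself is added separately).
--     closure_of: dict[str, tuple[str, ...]] = {
--         # Submissions
--         "submissions.read_all": ("submissions.read",),
--         "submissions.transition": ("submissions.read_all", "submissions.read"),
--         "submissions.update": ("submissions.read",),
--         "submissions.delete": ("submissions.read",),
--         "submissions.submit": ("submissions.read",),
--         "submissions.comment": ("submissions.read",),
--         # Products
--         "products.create": ("products.read",),
--         "products.update": ("products.read",),
--         "products.delete": ("products.read",),
--         "products.activate": ("products.read",),
--         "products.deactivate": ("products.read",),
--         # Templates
--         "templates.create": ("templates.read",),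
--         "templates.update": ("templates.read",),
--         "templates.publish": ("templates.read",),
--         # Baseline templates
--         "baseline_templates.create": ("baseline_templates.read",),
--         "baseline_templates.update": ("baseline_templates.read",),
--         "baseline_templates.delete": ("baseline_templates.read",),
--         "baseline_templates.definitions.create": ("baseline_templates.read",),
--         "baseline_templates.definitions.update": ("baseline_templates.read",),
--         "baseline_templates.definitions.delete": ("baseline_templates.read",),
--     }
--
--     result: set[str] = set()
--     for p in start:
--         result.add(p)
--         result.update(closure_of.get(p, ()))
--     return result
-- ===== Notes on version B (the rewrite author's own statement) =====
-- stated objective: alternative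
-- what changed: B replaces the runtime stack-based DFS over the implication graph with a single pass over start that unions precomputed per-permission transitive closures from a flattened table.
import Mathlib
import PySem

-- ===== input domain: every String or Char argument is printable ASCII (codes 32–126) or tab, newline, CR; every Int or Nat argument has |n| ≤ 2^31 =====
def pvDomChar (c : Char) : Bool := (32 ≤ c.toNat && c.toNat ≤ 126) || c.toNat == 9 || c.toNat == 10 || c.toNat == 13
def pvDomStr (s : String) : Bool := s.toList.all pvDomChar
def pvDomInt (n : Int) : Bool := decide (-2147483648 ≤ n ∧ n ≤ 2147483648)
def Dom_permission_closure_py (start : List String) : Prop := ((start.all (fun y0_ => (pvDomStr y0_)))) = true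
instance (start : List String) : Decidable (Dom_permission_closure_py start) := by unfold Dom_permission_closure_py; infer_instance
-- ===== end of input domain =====

-- B replaces A's runtime stack-based DFS by a single pass unioning precomputed per-permission
-- closures from a flattened table (objective: alternative; same asymptotic cost).
-- Both Pythons return a set, whose iteration order is not observable; the ports fix an order.

-- ===== PORT A =====
-- the literal `implies` dict of A (values are Python sets, here singleton lists)
def impliesDict : PySem.Dict String (PySem.Set String) := PySem.Dict.ofList
  [ ("submissions.read_all", ["submissions.read"])
  , ("submissions.transition", ["submissions.read_all"])
  , ("submissions.update", ["submissions.read"])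
  , ("submissions.delete", ["submissions.read"])
  , ("submissions.submit", ["submissions.read"])
  , ("submissions.comment", ["submissions.read"])
  , ("products.create", ["products.read"])
  , ("products.update", ["products.read"])
  , ("products.delete", ["products.read"])
  , ("products.activate", ["products.read"])
  , ("products.deactivate", ["products.read"])
  , ("templates.create", ["templates.read"])
  , ("templates.update", ["templates.read"])
  , ("templates.publish", ["templates.read"])
  , ("baseline_templates.create", ["baseline_templates.read"])
  , ("baseline_templates.update", ["baseline_templates.read"])
  , ("baseline_templates.delete", ["baseline_templates.read"])
  , ("baseline_templates.definitions.create", ["baseline_templates.read"])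
  , ("baseline_templates.definitions.update", ["baseline_templates.read"])
  , ("baseline_templates.definitions.delete", ["baseline_templates.read"]) ]

-- the keys of `impliesDict`; used only by the termination measure of the DFS loop
def pvKeys : List String :=
  [ "submissions.read_all", "submissions.transition", "submissions.update"
  , "submissions.delete", "submissions.submit", "submissions.comment"
  , "products.create", "products.update", "products.delete"
  , "products.activate", "products.deactivate"
  , "templates.create", "templates.update", "templates.publish"
  , "baseline_templates.create", "baseline_templates.update", "baseline_templates.delete"
  , "baseline_templates.definitions.create", "baseline_templates.definitions.update"
  , "baseline_templates.definitions.delete" ]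

lemma impliesMk : impliesDict = PySem.Dict.mk
  [ ("submissions.read_all", ["submissions.read"])
  , ("submissions.transition", ["submissions.read_all"])
  , ("submissions.update", ["submissions.read"])
  , ("submissions.delete", ["submissions.read"])
  , ("submissions.submit", ["submissions.read"])
  , ("submissions.comment", ["submissions.read"])
  , ("products.create", ["products.read"])
  , ("products.update", ["products.read"])
  , ("products.delete", ["products.read"])
  , ("products.activate", ["products.read"])
  , ("products.deactivate", ["products.read"])
  , ("templates.create", ["templates.read"])
  , ("templates.update", ["templates.read"])
  , ("templates.publish", ["templates.read"])
  , ("baseline_templates.create", ["baseline_templates.read"])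
  , ("baseline_templates.update", ["baseline_templates.read"])
  , ("baseline_templates.delete", ["baseline_templates.read"])
  , ("baseline_templates.definitions.create", ["baseline_templates.read"])
  , ("baseline_templates.definitions.update", ["baseline_templates.read"])
  , ("baseline_templates.definitions.delete", ["baseline_templates.read"]) ] := by decide

-- facts about the literal dict, used by the termination measure of `dfsA`
lemma pvImpliesNotKey (p : String) (hk : p ∉ pvKeys) :
    PySem.Dict.getD impliesDict p PySem.Set.empty = [] := by
  simp only [pvKeys, List.mem_cons, List.not_mem_nil, or_false, not_or] at hk
  obtain ⟨h1, h2, h3, h4, h5, h6, h7, h8, h9, h10, h11, h12, h13, h14, h15, h16, h17, h18, h19, h20⟩ := hk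
  rw [impliesMk]
  simp only [PySem.Dict.getD, PySem.Dict.get?_mk_cons, beq_iff_eq]
  rw [if_neg (fun h => h1 h.symm),
    if_neg (fun h => h2 h.symm),
    if_neg (fun h => h3 h.symm),
    if_neg (fun h => h4 h.symm),
    if_neg (fun h => h5 h.symm),
    if_neg (fun h => h6 h.symm),
    if_neg (fun h => h7 h.symm),
    if_neg (fun h => h8 h.symm),
    if_neg (fun h => h9 h.symm),
    if_neg (fun h => h10 h.symm),
    if_neg (fun h => h11 h.symm),
    if_neg (fun h => h12 h.symm),
    if_neg (fun h => h13 h.symm),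
    if_neg (fun h => h14 h.symm),
    if_neg (fun h => h15 h.symm),
    if_neg (fun h => h16 h.symm),
    if_neg (fun h => h17 h.symm),
    if_neg (fun h => h18 h.symm),
    if_neg (fun h => h19 h.symm),
    if_neg (fun h => h20 h.symm)]
  rfl

lemma pvImplies_len (p : String) : (PySem.Dict.getD impliesDict p PySem.Set.empty).length ≤ 1 := by
  by_cases hk : p ∈ pvKeys
  · simp only [pvKeys, List.mem_cons, List.not_mem_nil, or_false] at hk
    rcases hk with rfl|rfl|rfl|rfl|rfl|rfl|rfl|rfl|rfl|rfl|rfl|rfl|rfl|rfl|rfl|rfl|rfl|rfl|rfl|rfl <;> decide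
  · rw [pvImpliesNotKey p hk]
    decide

lemma pvImplies_key (p : String) :
    PySem.Dict.getD impliesDict p PySem.Set.empty ≠ [] → p ∈ pvKeys := by
  by_cases hk : p ∈ pvKeys
  · exact fun _ => hk
  · exact fun hne => absurd (pvImpliesNotKey p hk) hne

lemma pvFilter_le (l v : List String) (p : String) :
    (l.filter fun k => !decide (k ∈ v) && !decide (k = p)).length ≤
    (l.filter fun k => !decide (k ∈ v)).length := by
  induction l with
  | nil => simp
  | cons a l ih =>
    simp only [List.filter_cons]
    by_cases h2 : a = p
    · subst h2
      by_cases h1 : a ∈ v <;>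
        simp only [h1, decide_true, decide_false, Bool.not_true, Bool.not_false,
          Bool.and_false, Bool.and_true, if_true, if_false, Bool.false_eq_true,
          List.length_cons] <;> omega
    · by_cases h1 : a ∈ v <;>
        simp only [h1, h2, decide_true, decide_false, Bool.not_true, Bool.not_false,
          Bool.and_false, Bool.and_true, if_true, if_false, Bool.false_eq_true,
          List.length_cons] <;> omega

lemma pvFilter_lt (l v : List String) (p : String) (hp : p ∈ l) (hpv : p ∉ v) :
    (l.filter fun k => !decide (k ∈ v) && !decide (k = p)).length <
    (l.filter fun k => !decide (k ∈ v)).length := by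
  induction l with
  | nil => cases hp
  | cons a l ih =>
    simp only [List.filter_cons]
    rcases List.mem_cons.mp hp with rfl | hp'
    · have hle := pvFilter_le l v p
      simp only [hpv, decide_true, decide_false, Bool.not_true, Bool.not_false,
        Bool.and_false, Bool.and_true, if_true, if_false, Bool.false_eq_true,
        List.length_cons]
      omega
    · have hlt := ih hp'
      by_cases h2 : a = p
      · subst h2
        by_cases h1 : a ∈ v <;>
          simp only [h1, decide_true, decide_false, Bool.not_true, Bool.not_false,
            Bool.and_false, Bool.and_true, if_true, if_false, Bool.false_eq_true,
            List.length_cons] <;> omega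
      · by_cases h1 : a ∈ v <;>
          simp only [h1, h2, decide_true, decide_false, Bool.not_true, Bool.not_false,
            Bool.and_false, Bool.and_true, if_true, if_false, Bool.false_eq_true,
            List.length_cons] <;> omega

lemma pvNotContains {v : PySem.Set String} {p : String}
    (h : ¬ PySem.Set.contains v p = true) : p ∉ v :=
  fun hm => h ((PySem.Set.contains_iff v p).mpr hm)

-- A's while-loop: the stack's TOP (Python's list end) is the HEAD of the list here,
-- so `stack.pop()` takes the head and `stack.append(x)` prepends.
def dfsA (stack : List String) (visited : PySem.Set String) : PySem.Set String :=
  match stack with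
  | [] => visited
  | p :: rest =>
    if h : PySem.Set.contains visited p then
      dfsA rest visited
    else
      let visited' := PySem.Set.add visited p
      let pushed := (PySem.Dict.getD impliesDict p PySem.Set.empty).filter
        (fun nxt => !(PySem.Set.contains visited' nxt))
      dfsA (pushed.reverse ++ rest) visited'
termination_by stack.length + 2 * ((pvKeys.filter fun k => !(PySem.Set.contains visited k)).length)
decreasing_by
  · simp only [List.length_cons]; omega
  · have h1 := pvImplies_len p
    have hlen := List.length_filter_le
      (fun nxt => !(PySem.Set.contains (PySem.Set.add visited p) nxt))
      (PySem.Dict.getD impliesDict p PySem.Set.empty)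
    by_cases hk : p ∈ pvKeys
    · have h2 := pvFilter_lt pvKeys visited p hk (pvNotContains h)
      simp only [PySem.Set.contains_eq_listContains, List.contains_eq_mem, PySem.Set.mem_add,
        Bool.decide_or, Bool.not_or, List.length_append, List.length_reverse,
        List.length_cons] at hlen h2 ⊢
      omega
    · have hnil : PySem.Dict.getD impliesDict p PySem.Set.empty = [] := by
        by_contra hne
        exact hk (pvImplies_key p hne)
      have h2 := pvFilter_le pvKeys visited p
      simp only [hnil, List.filter_nil, List.length_nil, List.reverse_nil, List.nil_append,
        PySem.Set.contains_eq_listContains, List.contains_eq_mem, PySem.Set.mem_add,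
        Bool.decide_or, Bool.not_or, List.length_cons] at h2 ⊢
      omega

-- list(start) with pop-from-the-end processes `start` back to front: the initial
-- stack (top at head) is `start.reverse`; `visited` starts empty.
def permission_closure_py (start : List String) : List String :=
  dfsA start.reverse PySem.Set.empty

-- ===== PORT B =====
-- the literal `closure_of` table of B: each key's transitive implications
def closureTable : PySem.Dict String (List String) := PySem.Dict.ofList
  [ ("submissions.read_all", ["submissions.read"])
  , ("submissions.transition", ["submissions.read_all", "submissions.read"])
  , ("submissions.update", ["submissions.read"])
  , ("submissions.delete", ["submissions.read"])
  , ("submissions.submit", ["submissions.read"])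
  , ("submissions.comment", ["submissions.read"])
  , ("products.create", ["products.read"])
  , ("products.update", ["products.read"])
  , ("products.delete", ["products.read"])
  , ("products.activate", ["products.read"])
  , ("products.deactivate", ["products.read"])
  , ("templates.create", ["templates.read"])
  , ("templates.update", ["templates.read"])
  , ("templates.publish", ["templates.read"])
  , ("baseline_templates.create", ["baseline_templates.read"])
  , ("baseline_templates.update", ["baseline_templates.read"])
  , ("baseline_templates.delete", ["baseline_templates.read"])
  , ("baseline_templates.definitions.create", ["baseline_templates.read"])
  , ("baseline_templates.definitions.update", ["baseline_templates.read"])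
  , ("baseline_templates.definitions.delete", ["baseline_templates.read"]) ]

-- B's single pass: `for p in start: result.add(p); result.update(closure_of.get(p, ()))`.
-- Python iterates the SET `start` in unspecified hash order and the result is a set,
-- so the iteration order is unobservable; the port fixes reverse list order.
def permission_closure_py_alt (start : List String) : List String :=
  start.reverse.foldl
    (fun result p =>
      PySem.Set.update (PySem.Set.add result p) (PySem.Dict.getD closureTable p []))
    PySem.Set.empty

-- ===== PRECONDITION & SPEC =====
def Spec_permission_closure_py (start : List String) (out : List String) : Prop := out = permission_closure_py_alt start
instance (start : List String) (out : List String) : Decidable (Spec_permission_closure_py start out) := by unfold Spec_permission_closure_py; infer_instance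

-- ===== CLAIM (what is proved, stated in full; the proofs are below) =====
def Claim_equal_permission_closure_py : Prop := ∀ (start : List String), Dom_permission_closure_py start → Spec_permission_closure_py start (permission_closure_py start)

-- ===== LEMMAS AND PROOFS =====

-- abbreviations for the two tables' lookups
def pvGI (p : String) : List String := PySem.Dict.getD impliesDict p PySem.Set.empty
def pvGC (p : String) : List String := PySem.Dict.getD closureTable p []

-- B's loop body
def pvStep (result : PySem.Set String) (p : String) : PySem.Set String :=
  PySem.Set.update (PySem.Set.add result p) (PySem.Dict.getD closureTable p [])

lemma alt_eq_foldl (start : List String) :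
    permission_closure_py_alt start = start.reverse.foldl pvStep PySem.Set.empty := rfl

-- invariant: the visited set is closed under the (transitive) implications
def pvInv (v : PySem.Set String) : Prop :=
  ∀ k c : String, c ∈ pvGC k → k ∈ v → c ∈ v

set_option maxHeartbeats 1000000 in
lemma closureMk : closureTable = PySem.Dict.mk
  [ ("submissions.read_all", ["submissions.read"])
  , ("submissions.transition", ["submissions.read_all", "submissions.read"])
  , ("submissions.update", ["submissions.read"])
  , ("submissions.delete", ["submissions.read"])
  , ("submissions.submit", ["submissions.read"])
  , ("submissions.comment", ["submissions.read"])
  , ("products.create", ["products.read"])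
  , ("products.update", ["products.read"])
  , ("products.delete", ["products.read"])
  , ("products.activate", ["products.read"])
  , ("products.deactivate", ["products.read"])
  , ("templates.create", ["templates.read"])
  , ("templates.update", ["templates.read"])
  , ("templates.publish", ["templates.read"])
  , ("baseline_templates.create", ["baseline_templates.read"])
  , ("baseline_templates.update", ["baseline_templates.read"])
  , ("baseline_templates.delete", ["baseline_templates.read"])
  , ("baseline_templates.definitions.create", ["baseline_templates.read"])
  , ("baseline_templates.definitions.update", ["baseline_templates.read"])
  , ("baseline_templates.definitions.delete", ["baseline_templates.read"]) ] := by decide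

lemma pvNotKeyI (p : String) (hk : p ∉ pvKeys) : pvGI p = [] := by
  unfold pvGI
  exact pvImpliesNotKey p hk

lemma pvNotKeyC (p : String) (hk : p ∉ pvKeys) : pvGC p = [] := by
  unfold pvGC
  simp only [pvKeys, List.mem_cons, List.not_mem_nil, or_false, not_or] at hk
  obtain ⟨h1, h2, h3, h4, h5, h6, h7, h8, h9, h10, h11, h12, h13, h14, h15, h16, h17, h18, h19, h20⟩ := hk
  rw [closureMk]
  simp only [PySem.Dict.getD, PySem.Dict.get?_mk_cons, beq_iff_eq]
  rw [if_neg (fun h => h1 h.symm),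
    if_neg (fun h => h2 h.symm),
    if_neg (fun h => h3 h.symm),
    if_neg (fun h => h4 h.symm),
    if_neg (fun h => h5 h.symm),
    if_neg (fun h => h6 h.symm),
    if_neg (fun h => h7 h.symm),
    if_neg (fun h => h8 h.symm),
    if_neg (fun h => h9 h.symm),
    if_neg (fun h => h10 h.symm),
    if_neg (fun h => h11 h.symm),
    if_neg (fun h => h12 h.symm),
    if_neg (fun h => h13 h.symm),
    if_neg (fun h => h14 h.symm),
    if_neg (fun h => h15 h.symm),
    if_neg (fun h => h16 h.symm),
    if_neg (fun h => h17 h.symm),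
    if_neg (fun h => h18 h.symm),
    if_neg (fun h => h19 h.symm),
    if_neg (fun h => h20 h.symm)]
  rfl

-- the three shapes a permission can have in the two tables
def pvShapeS1 (p : String) : Prop :=
  ∃ c, pvGI p = [c] ∧ pvGC p = [c] ∧ pvGI c = [] ∧ pvGC c = [] ∧ c ≠ p

lemma pvS1_of (p c : String)
    (h : pvGI p = [c] ∧ pvGC p = [c] ∧ pvGI c = [] ∧ pvGC c = [] ∧ c ≠ p) : pvShapeS1 p :=
  ⟨c, h⟩

set_option maxHeartbeats 2000000 in
lemma pvShape (p : String) :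
    (pvGI p = [] ∧ pvGC p = []) ∨ pvShapeS1 p ∨ p = "submissions.transition" := by
  by_cases hk : p ∈ pvKeys
  · simp only [pvKeys, List.mem_cons, List.not_mem_nil, or_false] at hk
    rcases hk with rfl|rfl|rfl|rfl|rfl|rfl|rfl|rfl|rfl|rfl|rfl|rfl|rfl|rfl|rfl|rfl|rfl|rfl|rfl|rfl <;>
      first
      | exact Or.inr (Or.inr rfl)
      | exact Or.inr (Or.inl (pvS1_of _ "submissions.read" (by decide)))
      | exact Or.inr (Or.inl (pvS1_of _ "products.read" (by decide)))
      | exact Or.inr (Or.inl (pvS1_of _ "templates.read" (by decide)))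
      | exact Or.inr (Or.inl (pvS1_of _ "baseline_templates.read" (by decide)))
  · exact Or.inl ⟨pvNotKeyI p hk, pvNotKeyC p hk⟩

-- unfolding equations for the DFS loop
lemma dfsA_nil (v : PySem.Set String) : dfsA [] v = v := by rw [dfsA]

lemma dfsA_cons (p : String) (rest : List String) (v : PySem.Set String) :
    dfsA (p :: rest) v =
      if PySem.Set.contains v p then dfsA rest v
      else
        dfsA (((PySem.Dict.getD impliesDict p PySem.Set.empty).filter
            (fun nxt => !(PySem.Set.contains (PySem.Set.add v p) nxt))).reverse ++ rest)
          (PySem.Set.add v p) := by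
  rw [dfsA]
  by_cases hc : PySem.Set.contains v p
  · rw [dif_pos hc, if_pos hc]
  · rw [dif_neg hc, if_neg hc]

-- one DFS step on a non-key permission equals one B step
lemma pvStep0 (p : String) (rest : List String) (v : PySem.Set String)
    (hI : pvGI p = []) (hC : pvGC p = []) (hv : pvInv v) :
    dfsA (p :: rest) v = dfsA rest (pvStep v p) ∧ pvInv (pvStep v p) := by
  have hstep : pvStep v p = PySem.Set.add v p := by
    unfold pvStep
    rw [show PySem.Dict.getD closureTable p [] = [] from hC, PySem.Set.update_nil]
  have hI' : PySem.Dict.getD impliesDict p PySem.Set.empty = [] := hI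
  refine ⟨?_, ?_⟩
  · rw [dfsA_cons, hstep]
    by_cases hc : PySem.Set.contains v p
    · rw [if_pos hc, PySem.Set.add_of_mem ((PySem.Set.contains_iff v p).mp hc)]
    · rw [if_neg hc, hI']
      simp only [List.filter_nil, List.reverse_nil, List.nil_append]
  · rw [hstep]
    intro k c hkc hkm
    rcases (PySem.Set.mem_add v p k).mp hkm with hkv | rfl
    · exact (PySem.Set.mem_add v p c).mpr (Or.inl (hv k c hkc hkv))
    · rw [show pvGC k = [] from hC] at hkc
      cases hkc

-- one DFS step on a key whose implied permission is terminal equals one B step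
lemma pvStep1 (p c : String) (rest : List String) (v : PySem.Set String)
    (hIp : pvGI p = [c]) (hCp : pvGC p = [c]) (hIc : pvGI c = []) (hCc : pvGC c = [])
    (hne : c ≠ p) (hv : pvInv v) :
    dfsA (p :: rest) v = dfsA rest (pvStep v p) ∧ pvInv (pvStep v p) := by
  have hstep : pvStep v p = PySem.Set.add (PySem.Set.add v p) c := by
    unfold pvStep
    rw [show PySem.Dict.getD closureTable p [] = [c] from hCp,
      PySem.Set.update_cons, PySem.Set.update_nil]
  have hIp' : PySem.Dict.getD impliesDict p PySem.Set.empty = [c] := hIp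
  have hIc' : PySem.Dict.getD impliesDict c PySem.Set.empty = [] := hIc
  refine ⟨?_, ?_⟩
  · rw [dfsA_cons, hstep]
    by_cases hc : PySem.Set.contains v p
    · have hpv : p ∈ v := (PySem.Set.contains_iff v p).mp hc
      have hcv : c ∈ v := hv p c (by rw [hCp]; exact List.mem_singleton.mpr rfl) hpv
      rw [if_pos hc, PySem.Set.add_of_mem hpv, PySem.Set.add_of_mem hcv]
    · rw [if_neg hc]
      by_cases hcc : PySem.Set.contains (PySem.Set.add v p) c
      · -- c already visited
        have hca : c ∈ PySem.Set.add v p := (PySem.Set.contains_iff _ c).mp hcc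
        have hcv : c ∈ v := by
          rcases (PySem.Set.mem_add v p c).mp hca with h' | h'
          · exact h'
          · exact absurd h' hne
        have hfil : ((PySem.Dict.getD impliesDict p PySem.Set.empty).filter
            (fun nxt => !(PySem.Set.contains (PySem.Set.add v p) nxt))) = [] := by
          rw [hIp']
          simp [hcv]
        rw [hfil, PySem.Set.add_of_mem hca]
        simp only [List.reverse_nil, List.nil_append]
      · have hcm : c ∉ PySem.Set.add v p := pvNotContains hcc
        have hcv : c ∉ v := fun h' => hcm ((PySem.Set.mem_add v p c).mpr (Or.inl h'))
        have hfil : ((PySem.Dict.getD impliesDict p PySem.Set.empty).filter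
            (fun nxt => !(PySem.Set.contains (PySem.Set.add v p) nxt))) = [c] := by
          rw [hIp']
          simp [hcv, hne]
        rw [hfil]
        simp only [List.reverse_singleton, List.singleton_append]
        rw [dfsA_cons, if_neg hcc, hIc']
        simp only [List.filter_nil, List.reverse_nil, List.nil_append]
  · rw [hstep]
    intro k c' hkc' hkm
    rcases (PySem.Set.mem_add _ c k).mp hkm with hkm' | rfl
    · rcases (PySem.Set.mem_add v p k).mp hkm' with hkv | rfl
      · exact (PySem.Set.mem_add _ c c').mpr
          (Or.inl ((PySem.Set.mem_add v p c').mpr (Or.inl (hv k c' hkc' hkv))))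
      · rw [show pvGC k = [c] from hCp] at hkc'
        rw [List.mem_singleton.mp hkc']
        exact (PySem.Set.mem_add _ c c).mpr (Or.inr rfl)
    · rw [show pvGC k = [] from hCc] at hkc'
      cases hkc'

-- one DFS step on a key whose implied permission is itself a key equals one B step
lemma pvStep2 (p c d : String) (rest : List String) (v : PySem.Set String)
    (hIp : pvGI p = [c]) (hCp : pvGC p = [c, d]) (hIc : pvGI c = [d]) (hCc : pvGC c = [d])
    (hId : pvGI d = []) (hCd : pvGC d = [])
    (hcp : c ≠ p) (hdp : d ≠ p) (hdc : d ≠ c) (hv : pvInv v) :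
    dfsA (p :: rest) v = dfsA rest (pvStep v p) ∧ pvInv (pvStep v p) := by
  have hstep : pvStep v p =
      PySem.Set.add (PySem.Set.add (PySem.Set.add v p) c) d := by
    unfold pvStep
    rw [show PySem.Dict.getD closureTable p [] = [c, d] from hCp,
      PySem.Set.update_cons, PySem.Set.update_cons, PySem.Set.update_nil]
  have hIp' : PySem.Dict.getD impliesDict p PySem.Set.empty = [c] := hIp
  have hIc' : PySem.Dict.getD impliesDict c PySem.Set.empty = [d] := hIc
  have hId' : PySem.Dict.getD impliesDict d PySem.Set.empty = [] := hId
  refine ⟨?_, ?_⟩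
  · rw [dfsA_cons, hstep]
    by_cases hc : PySem.Set.contains v p
    · have hpv : p ∈ v := (PySem.Set.contains_iff v p).mp hc
      have hcv : c ∈ v := hv p c (by rw [hCp]; simp) hpv
      have hdv : d ∈ v := hv p d (by rw [hCp]; simp) hpv
      rw [if_pos hc, PySem.Set.add_of_mem hpv, PySem.Set.add_of_mem hcv,
        PySem.Set.add_of_mem hdv]
    · rw [if_neg hc]
      by_cases hcc : PySem.Set.contains (PySem.Set.add v p) c
      · -- c already visited, hence d visited too (closure invariant)
        have hca : c ∈ PySem.Set.add v p := (PySem.Set.contains_iff _ c).mp hcc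
        have hcv : c ∈ v := by
          rcases (PySem.Set.mem_add v p c).mp hca with h' | h'
          · exact h'
          · exact absurd h' hcp
        have hdv : d ∈ v := hv c d (by rw [hCc]; exact List.mem_singleton.mpr rfl) hcv
        have hfil : ((PySem.Dict.getD impliesDict p PySem.Set.empty).filter
            (fun nxt => !(PySem.Set.contains (PySem.Set.add v p) nxt))) = [] := by
          rw [hIp']
          simp [hcv]
        rw [hfil, PySem.Set.add_of_mem hca,
          PySem.Set.add_of_mem ((PySem.Set.mem_add v p d).mpr (Or.inl hdv))]
        simp only [List.reverse_nil, List.nil_append]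
      · have hcm : c ∉ PySem.Set.add v p := pvNotContains hcc
        have hcv : c ∉ v := fun h' => hcm ((PySem.Set.mem_add v p c).mpr (Or.inl h'))
        have hfil : ((PySem.Dict.getD impliesDict p PySem.Set.empty).filter
            (fun nxt => !(PySem.Set.contains (PySem.Set.add v p) nxt))) = [c] := by
          rw [hIp']
          simp [hcv, hcp]
        rw [hfil]
        simp only [List.reverse_singleton, List.singleton_append]
        rw [dfsA_cons, if_neg hcc]
        by_cases hdd : PySem.Set.contains (PySem.Set.add (PySem.Set.add v p) c) d
        · have hda : d ∈ PySem.Set.add (PySem.Set.add v p) c := (PySem.Set.contains_iff _ d).mp hdd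
          have hfil2 : ((PySem.Dict.getD impliesDict c PySem.Set.empty).filter
              (fun nxt => !(PySem.Set.contains (PySem.Set.add (PySem.Set.add v p) c) nxt))) = [] := by
            rw [hIc']
            have hdv : d ∈ v := by
              rcases (PySem.Set.mem_add _ c d).mp hda with h' | h'
              · rcases (PySem.Set.mem_add v p d).mp h' with h'' | h''
                · exact h''
                · exact absurd h'' hdp
              · exact absurd h' hdc
            simp [hdv]
          rw [hfil2, PySem.Set.add_of_mem hda]
          simp only [List.reverse_nil, List.nil_append]
        · have hdm : d ∉ PySem.Set.add (PySem.Set.add v p) c := pvNotContains hdd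
          have hdv : d ∉ v := fun h' => hdm ((PySem.Set.mem_add _ c d).mpr
            (Or.inl ((PySem.Set.mem_add v p d).mpr (Or.inl h'))))
          have hfil2 : ((PySem.Dict.getD impliesDict c PySem.Set.empty).filter
              (fun nxt => !(PySem.Set.contains (PySem.Set.add (PySem.Set.add v p) c) nxt))) = [d] := by
            rw [hIc']
            simp [hdv, hdp, hdc]
          rw [hfil2]
          simp only [List.reverse_singleton, List.singleton_append]
          rw [dfsA_cons, if_neg hdd, hId']
          simp only [List.filter_nil, List.reverse_nil, List.nil_append]
  · rw [hstep]
    intro k c' hkc' hkm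
    rcases (PySem.Set.mem_add _ d k).mp hkm with hkm' | rfl
    · rcases (PySem.Set.mem_add _ c k).mp hkm' with hkm'' | rfl
      · rcases (PySem.Set.mem_add v p k).mp hkm'' with hkv | rfl
        · exact (PySem.Set.mem_add _ d c').mpr (Or.inl ((PySem.Set.mem_add _ c c').mpr
            (Or.inl ((PySem.Set.mem_add v p c').mpr (Or.inl (hv k c' hkc' hkv))))))
        · rw [show pvGC k = [c, d] from hCp] at hkc'
          rcases List.mem_cons.mp hkc' with rfl | h'
          · exact (PySem.Set.mem_add _ d c').mpr (Or.inl ((PySem.Set.mem_add _ c' c').mpr (Or.inr rfl)))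
          · rw [List.mem_singleton.mp h']
            exact (PySem.Set.mem_add _ d d).mpr (Or.inr rfl)
      · rw [show pvGC k = [d] from hCc] at hkc'
        rw [List.mem_singleton.mp hkc']
        exact (PySem.Set.mem_add _ d d).mpr (Or.inr rfl)
    · rw [show pvGC k = [] from hCd] at hkc'
      cases hkc'

lemma pvInvEmpty : pvInv PySem.Set.empty := by
  intro k c _ hk
  cases hk

-- the DFS over any worklist, from any closure-closed visited set, is B's fold
lemma pvLoop (l : List String) :
    ∀ v : PySem.Set String, pvInv v →
      dfsA l v = l.foldl pvStep v ∧ pvInv (l.foldl pvStep v) := by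
  induction l with
  | nil =>
    intro v hv
    exact ⟨dfsA_nil v, hv⟩
  | cons p l ih =>
    intro v hv
    have hs : dfsA (p :: l) v = dfsA l (pvStep v p) ∧ pvInv (pvStep v p) := by
      rcases pvShape p with ⟨hI, hC⟩ | ⟨c, hIp, hCp, hIc, hCc, hne⟩ | rfl
      · exact pvStep0 p l v hI hC hv
      · exact pvStep1 p c l v hIp hCp hIc hCc hne hv
      · exact pvStep2 _ "submissions.read_all" "submissions.read" l v
          (by decide) (by decide) (by decide) (by decide) (by decide) (by decide)
          (by decide) (by decide) (by decide) hv
    obtain ⟨ih1, ih2⟩ := ih (pvStep v p) hs.2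
    exact ⟨hs.1.trans ih1, by simpa using ih2⟩

-- ===== VERDICT (by name: the statement is the Claim_ definition above) =====
theorem permission_closure_py_spec : Claim_equal_permission_closure_py := by
  intro start _
  show permission_closure_py start = permission_closure_py_alt start
  rw [alt_eq_foldl]
  unfold permission_closure_py
  exact (pvLoop start.reverse PySem.Set.empty pvInvEmpty).1
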